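-- pv_equiv track=rewrite | github.com/2203juan/algorithm_workshops | python/enero27/p1b.py | comprar_lista
-- ===== SOURCE A (Python) =====
-- def comprar_lista(supermercados, lista_productos):
--     ans = list()
--     band = True
--     for super in supermercados:
--         productos = super[1]
--         i = 0
--         band = True
--         while i < len(lista_productos) and band:
--             j = 0
--             while j < len(productos) and productos[j][0] != lista_productos[i][0]:
--                 j+=1
--
--             if not (j < len(productos) and productos[j][2] >= lista_productos[i][1]):
--                 band = False
--             i+=1
--
--         if band:
--             ans.append(super[0])
--     return ans
-- ===== SOURCE B (Python) =====
-- def comprar_lista(supermercados, lista_productos):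
--     # Keep the set of supermarket indices that can still satisfy every product,
--     # intersecting per required product; emit surviving names in original order.
--     surviving = set(range(len(supermercados)))
--     for pid, need in lista_productos:
--         keep = set()
--         for i in surviving:
--             stock = next((s for q, _m, s in supermercados[i][1] if q == pid), None)
--             if stock is not None and stock >= need:
--                 keep.add(i)
--         surviving = keep
--     return [name for i, (name, _prods) in enumerate(supermercados) if i in surviving]
-- ===== Notes on version B (the rewrite author's own statement) =====
-- stated objective: alternative
-- what changed: Replaces A's per-supermarket early-exit double while-loop with a per-product intersection of surviving supermarket-index sets, then emits surviving names by index in original order.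
import Mathlib
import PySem

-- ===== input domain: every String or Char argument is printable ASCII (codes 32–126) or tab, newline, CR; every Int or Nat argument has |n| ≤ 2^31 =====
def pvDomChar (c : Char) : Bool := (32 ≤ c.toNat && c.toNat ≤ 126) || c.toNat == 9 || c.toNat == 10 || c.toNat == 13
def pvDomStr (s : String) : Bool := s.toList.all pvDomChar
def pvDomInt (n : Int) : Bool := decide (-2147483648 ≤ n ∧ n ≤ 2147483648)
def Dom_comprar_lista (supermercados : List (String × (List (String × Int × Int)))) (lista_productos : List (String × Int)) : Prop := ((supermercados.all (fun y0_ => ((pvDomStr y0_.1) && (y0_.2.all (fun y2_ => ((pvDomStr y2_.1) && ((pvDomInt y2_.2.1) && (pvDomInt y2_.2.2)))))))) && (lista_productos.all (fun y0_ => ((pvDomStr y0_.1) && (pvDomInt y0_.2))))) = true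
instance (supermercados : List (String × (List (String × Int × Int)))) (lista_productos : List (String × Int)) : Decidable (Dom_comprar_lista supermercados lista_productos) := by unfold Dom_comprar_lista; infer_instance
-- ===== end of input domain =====

-- B replaces A's per-supermarket early-exit double while-loop with a per-product
-- intersection of surviving supermarket-index sets (alternative decomposition, same cost).


-- ===== PORT A =====
-- inner while: advance j while j < len(productos) and productos[j][0] != pid
def pvFindJ (productos : List (String × Int × Int)) (pid : String) (j : Nat) : Nat :=
  if h : j < productos.length ∧ (productos.getD j ("", 0, 0)).1 ≠ pid then
    pvFindJ productos pid (j + 1)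
  else j
termination_by productos.length - j
decreasing_by omega

-- outer while over i with the band flag, exactly A's loop body
def pvCheck (productos : List (String × Int × Int)) (lista : List (String × Int)) (i : Nat) (band : Bool) : Bool :=
  if i < lista.length ∧ band = true then
    let j := pvFindJ productos (lista.getD i ("", 0)).1 0
    let band' := if ¬ (j < productos.length ∧ (productos.getD j ("", 0, 0)).2.2 ≥ (lista.getD i ("", 0)).2) then false else band
    pvCheck productos lista (i + 1) band'
  else band
termination_by lista.length - i
decreasing_by omega

def comprar_lista (supermercados : List (String × (List (String × Int × Int)))) (lista_productos : List (String × Int)) : List String :=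
  supermercados.foldl (fun ans s => if pvCheck s.2 lista_productos 0 true then ans ++ [s.1] else ans) []

-- ===== PORT B =====
-- next((s for q, _m, s in prods if q == pid), None)
def pvFirstStock (prods : List (String × Int × Int)) (pid : String) : Option Int :=
  match prods with
  | [] => none
  | (q, _m, s) :: rest => if q == pid then some s else pvFirstStock rest pid

-- 'stock is not None and stock >= need' for supermarket index i
def pvOk (supermercados : List (String × (List (String × Int × Int)))) (pid : String) (need : Int) (i : Nat) : Bool :=
  match pvFirstStock (supermercados.getD i ("", [])).2 pid with
  | some s => decide (s ≥ need)
  | none => false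

-- final comprehension: names of supermarkets whose index survived
def pvOut (supermercados : List (String × (List (String × Int × Int)))) (surv : List Nat) (k : Nat) : List String :=
  match supermercados with
  | [] => []
  | s :: rest => if surv.contains k then s.1 :: pvOut rest surv (k + 1) else pvOut rest surv (k + 1)

def comprar_lista_alt (supermercados : List (String × (List (String × Int × Int)))) (lista_productos : List (String × Int)) : List String :=
  let surviving := lista_productos.foldl
    (fun surv p => surv.filter (pvOk supermercados p.1 p.2))
    (List.range supermercados.length)
  pvOut supermercados surviving 0

-- ===== PRECONDITION & SPEC =====
def Spec_comprar_lista (supermercados : List (String × (List (String × Int × Int)))) (lista_productos : List (String × Int)) (out : List String) : Prop := out = comprar_lista_alt supermercados lista_productos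
instance (supermercados : List (String × (List (String × Int × Int)))) (lista_productos : List (String × Int)) (out : List String) : Decidable (Spec_comprar_lista supermercados lista_productos out) := by unfold Spec_comprar_lista; infer_instance

-- ===== CLAIM (what is proved, stated in full; the proofs are below) =====
def Claim_equal_comprar_lista : Prop := ∀ (supermercados : List (String × (List (String × Int × Int)))) (lista_productos : List (String × Int)), Dom_comprar_lista supermercados lista_productos → Spec_comprar_lista supermercados lista_productos (comprar_lista supermercados lista_productos)

-- ===== LEMMAS AND PROOFS =====

-- the "A succeeds on one required product" condition as a Bool (B's pvOk, storewise)
def pvOkStock (prods : List (String × Int × Int)) (pid : String) (need : Int) : Bool :=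
  match pvFirstStock prods pid with
  | some s => decide (s ≥ need)
  | none => false

theorem pvFindJ_shift (x : String × Int × Int) (prods : List (String × Int × Int)) (pid : String) (j : Nat) :
    pvFindJ (x :: prods) pid (j + 1) = pvFindJ prods pid j + 1 := by
  suffices H : ∀ n j, prods.length - j ≤ n → pvFindJ (x :: prods) pid (j + 1) = pvFindJ prods pid j + 1 from
    H (prods.length - j) j le_rfl
  intro n
  induction n with
  | zero =>
    intro j hj
    have h1 : ¬ (j < prods.length ∧ (prods.getD j ("", 0, 0)).1 ≠ pid) := by
      intro h; omega
    have h2 : ¬ (j + 1 < (x :: prods).length ∧ ((x :: prods).getD (j + 1) ("", 0, 0)).1 ≠ pid) := by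
      simp only [List.length_cons, List.getD_cons_succ]
      intro h; exact h1 ⟨by omega, h.2⟩
    conv_lhs => rw [pvFindJ]
    conv_rhs => rw [pvFindJ]
    rw [dif_neg h2, dif_neg h1]
  | succ n ih =>
    intro j hj
    by_cases h1 : j < prods.length ∧ (prods.getD j ("", 0, 0)).1 ≠ pid
    · have h2 : j + 1 < (x :: prods).length ∧ ((x :: prods).getD (j + 1) ("", 0, 0)).1 ≠ pid := by
        simp only [List.length_cons, List.getD_cons_succ]
        exact ⟨by omega, h1.2⟩
      conv_lhs => rw [pvFindJ]
      conv_rhs => rw [pvFindJ]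
      rw [dif_pos h2, dif_pos h1]
      exact ih (j + 1) (by omega)
    · have h2 : ¬ (j + 1 < (x :: prods).length ∧ ((x :: prods).getD (j + 1) ("", 0, 0)).1 ≠ pid) := by
        simp only [List.length_cons, List.getD_cons_succ]
        intro h; exact h1 ⟨by omega, h.2⟩
      conv_lhs => rw [pvFindJ]
      conv_rhs => rw [pvFindJ]
      rw [dif_neg h2, dif_neg h1]

theorem cond_iff (prods : List (String × Int × Int)) (pid : String) (need : Int) :
    (pvFindJ prods pid 0 < prods.length ∧ (prods.getD (pvFindJ prods pid 0) ("", 0, 0)).2.2 ≥ need)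
      ↔ pvOkStock prods pid need = true := by
  induction prods with
  | nil =>
    rw [pvFindJ]
    simp [pvOkStock, pvFirstStock]
  | cons x rest ih =>
    obtain ⟨q, m, s⟩ := x
    by_cases hq : q = pid
    · have h0 : pvFindJ ((q, m, s) :: rest) pid 0 = 0 := by
        rw [pvFindJ]
        rw [dif_neg]
        simp [hq]
      rw [h0]
      simp [pvOkStock, pvFirstStock, hq]
    · have h0 : pvFindJ ((q, m, s) :: rest) pid 0 = pvFindJ rest pid 0 + 1 := by
        conv_lhs => rw [pvFindJ]
        rw [dif_pos ⟨by simp, by simp [hq]⟩]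
        exact pvFindJ_shift _ _ _ 0
      rw [h0]
      have hstep : pvOkStock ((q, m, s) :: rest) pid need = pvOkStock rest pid need := by
        simp [pvOkStock, pvFirstStock, hq]
      rw [hstep]
      constructor
      · rintro ⟨h1, h2⟩
        exact ih.mp ⟨by simpa using h1, by simpa using h2⟩
      · intro h
        obtain ⟨h1, h2⟩ := ih.mpr h
        exact ⟨by simpa using h1, by simpa using h2⟩

theorem pvCheck_false (prods : List (String × Int × Int)) (lista : List (String × Int)) (i : Nat) :
    pvCheck prods lista i false = false := by
  rw [pvCheck]; simp

theorem pvCheck_eq_all (prods : List (String × Int × Int)) (lista : List (String × Int)) (i : Nat) :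
    pvCheck prods lista i true = (lista.drop i).all (fun p => pvOkStock prods p.1 p.2) := by
  suffices H : ∀ n i, lista.length - i ≤ n →
      pvCheck prods lista i true = (lista.drop i).all (fun p => pvOkStock prods p.1 p.2) from
    H (lista.length - i) i le_rfl
  intro n
  induction n with
  | zero =>
    intro i hi
    rw [pvCheck]
    have h1 : ¬ (i < lista.length ∧ (true : Bool) = true) := by intro h; omega
    have h2 : lista.drop i = [] := List.drop_eq_nil_of_le (by omega)
    rw [if_neg h1, h2]
    rfl
  | succ n ih =>
    intro i hi
    rw [pvCheck]
    by_cases h1 : i < lista.length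
    · rw [if_pos ⟨h1, rfl⟩]
      have hgd : lista.getD i ("", 0) = lista[i] := List.getD_eq_getElem lista ("", 0) h1
      have hdrop : lista.drop i = lista.getD i ("", 0) :: lista.drop (i + 1) := by
        rw [hgd]; exact List.drop_eq_getElem_cons h1
      by_cases hc : (pvFindJ prods (lista.getD i ("", 0)).1 0 < prods.length ∧
          (prods.getD (pvFindJ prods (lista.getD i ("", 0)).1 0) ("", 0, 0)).2.2 ≥ (lista.getD i ("", 0)).2)
      all_goals show pvCheck prods lista (i + 1) (if ¬ (pvFindJ prods (lista.getD i ("", 0)).1 0 < prods.length ∧ (prods.getD (pvFindJ prods (lista.getD i ("", 0)).1 0) ("", 0, 0)).2.2 ≥ (lista.getD i ("", 0)).2) then false else true) = (List.drop i lista).all fun p => pvOkStock prods p.1 p.2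
      · have hok : pvOkStock prods (lista.getD i ("", 0)).1 (lista.getD i ("", 0)).2 = true :=
          (cond_iff _ _ _).mp hc
        rw [if_neg (not_not_intro hc)]
        rw [ih (i + 1) (by omega), hdrop]
        simp only [List.all_cons, hok, Bool.true_and]
      · have hok : pvOkStock prods (lista.getD i ("", 0)).1 (lista.getD i ("", 0)).2 = false := by
          cases h : pvOkStock prods (lista.getD i ("", 0)).1 (lista.getD i ("", 0)).2 with
          | false => rfl
          | true => exact absurd ((cond_iff _ _ _).mpr h) hc
        rw [if_pos hc, pvCheck_false, hdrop]
        simp only [List.all_cons, hok, Bool.false_and]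
    · have hcond : ¬ (i < lista.length ∧ (true : Bool) = true) := by intro h; exact h1 h.1
      have h2 : lista.drop i = [] := List.drop_eq_nil_of_le (by omega)
      rw [if_neg hcond, h2]
      rfl

theorem foldl_append_filter (lista : List (String × Int))
    (l : List (String × (List (String × Int × Int)))) (acc : List String) :
    l.foldl (fun ans s => if pvCheck s.2 lista 0 true then ans ++ [s.1] else ans) acc
      = acc ++ (l.filter (fun s => pvCheck s.2 lista 0 true)).map (·.1) := by
  induction l generalizing acc with
  | nil => simp
  | cons s rest ih =>
    by_cases h : pvCheck s.2 lista 0 true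
    · simp [h, ih]
    · simp [h, ih]

theorem foldl_filter_all (lista : List (String × Int)) (init : List Nat)
    (f : (String × Int) → Nat → Bool) :
    lista.foldl (fun s p => s.filter (f p)) init
      = init.filter (fun i => lista.all (fun p => f p i)) := by
  induction lista generalizing init with
  | nil => simp
  | cons p rest ih =>
    simp only [List.foldl_cons, ih, List.filter_filter, List.all_cons]
    exact List.filter_congr (fun a _ => by cases f p a <;> simp)

theorem pvOut_eq_filter (full : List (String × (List (String × Int × Int))))
    (lista : List (String × Int)) :
    ∀ (rest : List (String × (List (String × Int × Int)))) (k : Nat), full.drop k = rest →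
      pvOut rest ((List.range full.length).filter (fun i => lista.all (fun p => pvOk full p.1 p.2 i))) k
        = (rest.filter (fun s => lista.all (fun p => pvOkStock s.2 p.1 p.2))).map (·.1) := by
  intro rest
  induction rest with
  | nil => intro k _; simp [pvOut]
  | cons s rest' ih =>
    intro k hk
    have hklt : k < full.length := by
      have := congrArg List.length hk
      simp only [List.length_drop, List.length_cons] at this
      omega
    have hcons := List.drop_eq_getElem_cons hklt
    rw [hk] at hcons
    injection hcons with h1 h2
    have hgetD : full.getD k ("", []) = s := by
      rw [List.getD_eq_getElem full ("", []) hklt, ← h1]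
    have hdrop' : full.drop (k + 1) = rest' := h2.symm
    have hpred : (fun p : String × Int => pvOk full p.1 p.2 k) = (fun p => pvOkStock s.2 p.1 p.2) := by
      funext p
      simp only [pvOk, pvOkStock, hgetD]
    have hcontains : ((List.range full.length).filter (fun i => lista.all (fun p => pvOk full p.1 p.2 i))).contains k
        = lista.all (fun p => pvOkStock s.2 p.1 p.2) := by
      cases hall : lista.all (fun p => pvOkStock s.2 p.1 p.2) with
      | true =>
        refine List.contains_iff_mem.mpr ?_
        rw [List.mem_filter, List.mem_range]
        exact ⟨hklt, by rw [hpred]; exact hall⟩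
      | false =>
        refine Bool.eq_false_iff.mpr ?_
        intro hcon
        have hmem := List.contains_iff_mem.mp hcon
        rw [List.mem_filter] at hmem
        have := hmem.2
        rw [hpred, hall] at this
        exact Bool.false_ne_true this
    rw [pvOut, hcontains]
    cases hall : lista.all (fun p => pvOkStock s.2 p.1 p.2) with
    | true =>
      rw [if_pos rfl]
      rw [ih (k + 1) hdrop']
      simp [hall]
    | false =>
      rw [if_neg (by simp)]
      rw [ih (k + 1) hdrop']
      simp [hall]

-- ===== VERDICT (by name: the statement is the Claim_ definition above) =====
theorem comprar_lista_spec : Claim_equal_comprar_lista := by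
  intro supermercados lista_productos _
  unfold Spec_comprar_lista comprar_lista comprar_lista_alt
  rw [foldl_append_filter, foldl_filter_all]
  rw [pvOut_eq_filter supermercados lista_productos supermercados 0 rfl]
  simp only [List.nil_append]
  congr 1
  apply List.filter_congr
  intro s _
  rw [pvCheck_eq_all]
  simp
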